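-- pv_equiv track=rewrite | github.com/GuillaumeMulier/MarmotsTuesday | PathFinding/PathfindingAlgorithm.py | VoisinsCroix
-- ===== SOURCE A (Python) =====
-- def VoisinsCroix(rr, cc, RMax, CMax, RMin=0, CMin=0, Longueur=1):
--     """
--     Function that find coordinates of neighbours in cross
--     :param rr: row
--     :param cc: column
--     :param RMin, CMin: Minimum index of row and column
--     :param RMax, CMax: Maximum index of row and column
--     :return: list of tuples (row, column) of the neighbours
--     """
--     Res = []
--     Directions = []
--     for i in range(-Longueur, Longueur + 1):
--         for j in range(-Longueur, Longueur + 1):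
--             if (i == 0) ^ (j == 0): Directions.append((i, j))
--     for re, ce in Directions:
--         rvois = rr + re
--         cvois = cc + ce
--         if rvois in range(RMin, RMax) and cvois in range(CMin, CMax):
--             Res.append((rvois, cvois))
--     return Res
-- ===== SOURCE B (Python) =====
-- def VoisinsCroix(rr, cc, RMax, CMax, RMin=0, CMin=0, Longueur=1):
--     """Same neighbours, built arm by arm in O(Longueur) without scanning the (2L+1)^2 grid."""
--     Res = []
--     for i in range(-Longueur, 0):
--         if RMin <= rr + i < RMax and CMin <= cc < CMax:
--             Res.append((rr + i, cc))
--     for j in range(-Longueur, 0):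
--         if RMin <= rr < RMax and CMin <= cc + j < CMax:
--             Res.append((rr, cc + j))
--     for j in range(1, Longueur + 1):
--         if RMin <= rr < RMax and CMin <= cc + j < CMax:
--             Res.append((rr, cc + j))
--     for i in range(1, Longueur + 1):
--         if RMin <= rr + i < RMax and CMin <= cc < CMax:
--             Res.append((rr + i, cc))
--     return Res
-- ===== Notes on version B (the rewrite author's own statement) =====
-- stated objective: faster
-- what changed: B generates the four cross arms directly with four O(Longueur) loops, replacing A's scan of the whole (2*Longueur+1)^2 offset grid with an xor test to build an intermediate Directions list.
import Mathlib
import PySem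

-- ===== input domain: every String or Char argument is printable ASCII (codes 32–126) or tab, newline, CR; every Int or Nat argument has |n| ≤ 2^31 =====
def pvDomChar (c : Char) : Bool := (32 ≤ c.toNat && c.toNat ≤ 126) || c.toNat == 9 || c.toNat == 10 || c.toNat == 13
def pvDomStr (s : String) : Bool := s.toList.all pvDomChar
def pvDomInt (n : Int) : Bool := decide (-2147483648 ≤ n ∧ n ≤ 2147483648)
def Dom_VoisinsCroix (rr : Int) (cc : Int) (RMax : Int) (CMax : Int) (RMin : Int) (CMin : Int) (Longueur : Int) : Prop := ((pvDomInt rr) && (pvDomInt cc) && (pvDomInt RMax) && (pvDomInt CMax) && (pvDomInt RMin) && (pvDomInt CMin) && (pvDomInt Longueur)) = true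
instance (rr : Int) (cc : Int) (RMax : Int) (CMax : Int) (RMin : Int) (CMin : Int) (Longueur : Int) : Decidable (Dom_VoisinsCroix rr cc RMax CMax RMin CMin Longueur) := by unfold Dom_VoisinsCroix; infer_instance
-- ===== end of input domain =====

-- B builds the four arms of the cross directly (O(Longueur)) instead of A's scan of the
-- whole (2·Longueur+1)² offset grid with an xor test (objective: faster, asymptotic).

-- ===== PORT A =====
-- literal port of A: build Directions by a nested scan of range(-L, L+1)² keeping the
-- xor-selected offsets, then append each in-bounds neighbour.
def VoisinsCroix (rr : Int) (cc : Int) (RMax : Int) (CMax : Int) (RMin : Int) (CMin : Int) (Longueur : Int) : List (Int × Int) :=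
  let R := PySem.List.pyRange (-Longueur) (Longueur + 1) 1
  let Directions : List (Int × Int) :=
    R.foldl (fun acc i =>
      R.foldl (fun acc2 j =>
        if ((i == 0) ^^ (j == 0)) then acc2 ++ [(i, j)] else acc2) acc) []
  Directions.foldl (fun res d =>
    let rvois := rr + d.1
    let cvois := cc + d.2
    if (RMin ≤ rvois ∧ rvois < RMax) ∧ (CMin ≤ cvois ∧ cvois < CMax) then
      res ++ [(rvois, cvois)]
    else res) []

-- ===== PORT B =====
-- literal port of Source B: four O(Longueur) loops, one per arm of the cross.
def VoisinsCroix_alt (rr : Int) (cc : Int) (RMax : Int) (CMax : Int) (RMin : Int) (CMin : Int) (Longueur : Int) : List (Int × Int) :=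
  let res1 := (PySem.List.pyRange (-Longueur) 0 1).foldl (fun res i =>
      if (RMin ≤ rr + i ∧ rr + i < RMax) ∧ (CMin ≤ cc ∧ cc < CMax) then res ++ [(rr + i, cc)] else res) []
  let res2 := (PySem.List.pyRange (-Longueur) 0 1).foldl (fun res j =>
      if (RMin ≤ rr ∧ rr < RMax) ∧ (CMin ≤ cc + j ∧ cc + j < CMax) then res ++ [(rr, cc + j)] else res) res1
  let res3 := (PySem.List.pyRange 1 (Longueur + 1) 1).foldl (fun res j =>
      if (RMin ≤ rr ∧ rr < RMax) ∧ (CMin ≤ cc + j ∧ cc + j < CMax) then res ++ [(rr, cc + j)] else res) res2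
  (PySem.List.pyRange 1 (Longueur + 1) 1).foldl (fun res i =>
      if (RMin ≤ rr + i ∧ rr + i < RMax) ∧ (CMin ≤ cc ∧ cc < CMax) then res ++ [(rr + i, cc)] else res) res3

-- ===== PRECONDITION & SPEC =====
def Spec_VoisinsCroix (rr : Int) (cc : Int) (RMax : Int) (CMax : Int) (RMin : Int) (CMin : Int) (Longueur : Int) (out : List (Int × Int)) : Prop := out = VoisinsCroix_alt rr cc RMax CMax RMin CMin Longueur
instance (rr : Int) (cc : Int) (RMax : Int) (CMax : Int) (RMin : Int) (CMin : Int) (Longueur : Int) (out : List (Int × Int)) : Decidable (Spec_VoisinsCroix rr cc RMax CMax RMin CMin Longueur out) := by unfold Spec_VoisinsCroix; infer_instance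

-- ===== CLAIM (what is proved, stated in full; the proofs are below) =====
def Claim_equal_VoisinsCroix : Prop := ∀ (rr : Int) (cc : Int) (RMax : Int) (CMax : Int) (RMin : Int) (CMin : Int) (Longueur : Int), Dom_VoisinsCroix rr cc RMax CMax RMin CMin Longueur → Spec_VoisinsCroix rr cc RMax CMax RMin CMin Longueur (VoisinsCroix rr cc RMax CMax RMin CMin Longueur)

-- ===== LEMMAS AND PROOFS =====

-- a flatMap whose every value is a singleton is a map
theorem pv_flatMap_sing {α β : Type} (l : List α) (g : α → List β) (h : α → β)
    (hg : ∀ a ∈ l, g a = [h a]) : l.flatMap g = l.map h := by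
  induction l with
  | nil => simp
  | cons a t ih =>
      simp only [List.flatMap_cons, List.map_cons, hg a (by simp),
        ih (fun x hx => hg x (by simp [hx])), List.singleton_append]

theorem pv_main (rr cc RMax CMax RMin CMin L : Int) :
    VoisinsCroix rr cc RMax CMax RMin CMin L = VoisinsCroix_alt rr cc RMax CMax RMin CMin L := by
  by_cases hL : 0 ≤ L
  case neg =>
    unfold VoisinsCroix VoisinsCroix_alt
    rw [PySem.List.pyRange_one_eq_nil (by omega), PySem.List.pyRange_one_eq_nil (a := -L) (by omega),
        PySem.List.pyRange_one_eq_nil (a := 1) (by omega)]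
    simp
  case pos =>
    unfold VoisinsCroix VoisinsCroix_alt
    simp only [PySem.List.foldl_append_if, PySem.List.foldl_append_ite,
      PySem.List.foldl_append_eq_flatMap, List.nil_append]
    have hsplit : PySem.List.pyRange (-L) (L + 1) 1 =
        PySem.List.pyRange (-L) 0 1 ++ 0 :: PySem.List.pyRange 1 (L + 1) 1 := by
      rw [PySem.List.pyRange_one_append (-L) 0 (L + 1) (by omega) (by omega),
          PySem.List.pyRange_one_cons (show (0:Int) < L + 1 by omega)]
      norm_num
    have hnegs : ∀ i ∈ PySem.List.pyRange (-L) 0 1, i < 0 := by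
      intro i hi; have := PySem.List.mem_pyRange_one.mp hi; omega
    have hposs : ∀ i ∈ PySem.List.pyRange 1 (L + 1) 1, 0 < i := by
      intro i hi; have := PySem.List.mem_pyRange_one.mp hi; omega
    have hfilt0 : (PySem.List.pyRange (-L) 0 1 ++ 0 :: PySem.List.pyRange 1 (L + 1) 1).filter (fun j => j == 0) = [0] := by
      rw [List.filter_append, List.filter_cons]
      rw [List.filter_eq_nil_iff.mpr (fun a ha => by have := hnegs a ha; simp; omega),
          List.filter_eq_nil_iff.mpr (fun a ha => by have := hposs a ha; simp; omega)]
      simp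
    have hfiltne : (PySem.List.pyRange (-L) 0 1 ++ 0 :: PySem.List.pyRange 1 (L + 1) 1).filter (fun j => !(j == 0)) =
        PySem.List.pyRange (-L) 0 1 ++ PySem.List.pyRange 1 (L + 1) 1 := by
      rw [List.filter_append, List.filter_cons]
      rw [List.filter_eq_self.mpr (fun a ha => by have := hnegs a ha; simp; omega),
          List.filter_eq_self.mpr (fun a ha => by have := hposs a ha; simp; omega)]
      simp
    conv_lhs => rw [hsplit]
    rw [List.flatMap_append, List.flatMap_cons]
    rw [pv_flatMap_sing _ _ (fun i => (i, (0:Int)))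
        (fun a ha => by
          have hane : ¬ (a == 0) = true := by have := hnegs a ha; simp; omega
          rw [show (fun x_1 => a == 0 ^^ x_1 == 0) = (fun j => j == (0:Int)) from
            funext fun j => by simp [Bool.eq_false_iff.mpr hane]]
          rw [hfilt0]; simp)]
    rw [pv_flatMap_sing _ _ (fun i => (i, (0:Int)))
        (fun a ha => by
          have hane : ¬ (a == 0) = true := by have := hposs a ha; simp; omega
          rw [show (fun x_1 => a == 0 ^^ x_1 == 0) = (fun j => j == (0:Int)) from
            funext fun j => by simp [Bool.eq_false_iff.mpr hane]]
          rw [hfilt0]; simp)]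
    rw [show (fun x_1 => (0:Int) == 0 ^^ x_1 == 0) = (fun j => !(j == (0:Int))) from
          funext fun j => by simp]
    rw [hfiltne]
    simp only [List.map_append, List.filter_append, List.filter_map, List.map_map,
      Function.comp_def, add_zero, List.append_assoc]

-- ===== VERDICT (by name: the statement is the Claim_ definition above) =====
theorem VoisinsCroix_spec : Claim_equal_VoisinsCroix := by
  intro rr cc RMax CMax RMin CMin Longueur _
  unfold Spec_VoisinsCroix
  exact pv_main rr cc RMax CMax RMin CMin Longueur
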